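-- pv_equiv track=rewrite | github.com/Vinojithab17/Leet_Hack | Leetcode/Blast.py | find_hits
-- ===== SOURCE A (Python) =====
-- def find_hits(seq1, seq2, k):
--     hits = []
--     for i in range(len(seq1) - k + 1):
--         kmer = seq1[i:i+k]
--         for j in range(len(seq2) - k + 1):
--             if seq2[j:j+k] == kmer:
--                 hits.append((i, j, kmer))
--     return hits
-- ===== SOURCE B (Python) =====
-- def find_hits(seq1, seq2, k):
--     # Index seq2's k-mers once: kmer -> list of positions j (increasing).
--     index = {}
--     for j in range(len(seq2) - k + 1):
--         index.setdefault(seq2[j:j+k], []).append(j)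
--     return [(i, j, seq1[i:i+k])
--             for i in range(len(seq1) - k + 1)
--             for j in index.get(seq1[i:i+k], [])]
-- ===== Notes on version B (the rewrite author's own statement) =====
-- stated objective: alternative
-- what changed: B builds a dict index of seq2's k-mers (kmer -> list of positions) in one pass and emits hits by a comprehension looking each seq1 k-mer up, removing A's inner scan of seq2 with a slice comparison per (i,j) pair; the timing family's constant strings make the output itself quadratic, so no speed is claimed.
import Mathlib
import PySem

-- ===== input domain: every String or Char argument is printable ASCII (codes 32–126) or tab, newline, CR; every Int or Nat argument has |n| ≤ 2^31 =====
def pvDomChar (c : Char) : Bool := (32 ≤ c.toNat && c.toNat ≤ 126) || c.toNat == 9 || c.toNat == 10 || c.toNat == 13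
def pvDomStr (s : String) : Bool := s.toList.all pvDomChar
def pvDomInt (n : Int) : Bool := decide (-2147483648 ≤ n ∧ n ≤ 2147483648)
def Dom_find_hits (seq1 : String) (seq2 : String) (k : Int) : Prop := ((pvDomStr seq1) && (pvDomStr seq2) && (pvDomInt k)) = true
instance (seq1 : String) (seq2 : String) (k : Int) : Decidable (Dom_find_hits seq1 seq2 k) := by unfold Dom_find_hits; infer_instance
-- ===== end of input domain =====

-- B replaces A's nested scan by a one-pass dict index of seq2's k-mers
-- (kmer -> positions) looked up per i (objective: alternative).

-- ===== PORT A =====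
def find_hits (seq1 : String) (seq2 : String) (k : Int) : List (Int × Int × String) :=
  (PySem.List.pyRange 0 (PySem.Str.len seq1 - k + 1) 1).foldl (fun hits i =>
    let kmer := PySem.Str.slice seq1 (some i) (some (i + k))
    (PySem.List.pyRange 0 (PySem.Str.len seq2 - k + 1) 1).foldl (fun hits j =>
      if PySem.Str.slice seq2 (some j) (some (j + k)) == kmer then hits ++ [(i, j, kmer)]
      else hits) hits) []

-- ===== PORT B =====
def find_hits_alt (seq1 : String) (seq2 : String) (k : Int) : List (Int × Int × String) :=
  let index : PySem.Dict String (List Int) :=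
    (PySem.List.pyRange 0 (PySem.Str.len seq2 - k + 1) 1).foldl
      (fun d j => d.modify (PySem.Str.slice seq2 (some j) (some (j + k))) [] (· ++ [j]))
      PySem.Dict.empty
  (PySem.List.pyRange 0 (PySem.Str.len seq1 - k + 1) 1).flatMap (fun i =>
    (index.getD (PySem.Str.slice seq1 (some i) (some (i + k))) []).map (fun j =>
      (i, j, PySem.Str.slice seq1 (some i) (some (i + k)))))

-- ===== PRECONDITION & SPEC =====
def Spec_find_hits (seq1 : String) (seq2 : String) (k : Int) (out : List (Int × Int × String)) : Prop := out = find_hits_alt seq1 seq2 k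
instance (seq1 : String) (seq2 : String) (k : Int) (out : List (Int × Int × String)) : Decidable (Spec_find_hits seq1 seq2 k out) := by unfold Spec_find_hits; infer_instance

-- ===== CLAIM (what is proved, stated in full; the proofs are below) =====
def Claim_equal_find_hits : Prop := ∀ (seq1 : String) (seq2 : String) (k : Int), Dom_find_hits seq1 seq2 k → Spec_find_hits seq1 seq2 k (find_hits seq1 seq2 k)

-- ===== LEMMAS AND PROOFS =====

-- B's index lookup is exactly the list of matching positions of seq2, in order.
theorem pv_index_getD (seq2 : String) (k : Int) (kmer : String) :
    (((PySem.List.pyRange 0 (PySem.Str.len seq2 - k + 1) 1).foldl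
        (fun d j => d.modify (PySem.Str.slice seq2 (some j) (some (j + k))) [] (· ++ [j]))
        (PySem.Dict.empty : PySem.Dict String (List Int))).getD kmer [])
    = (PySem.List.pyRange 0 (PySem.Str.len seq2 - k + 1) 1).filter
        (fun j => PySem.Str.slice seq2 (some j) (some (j + k)) == kmer) := by
  have h := PySem.Dict.getD_foldl_modify_append
      ((PySem.List.pyRange 0 (PySem.Str.len seq2 - k + 1) 1).map
        (fun j => (PySem.Str.slice seq2 (some j) (some (j + k)), j)))
      (PySem.Dict.empty : PySem.Dict String (List Int)) kmer
  rw [List.foldl_map] at h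
  rw [h, List.filter_map, List.map_map]
  simp [Function.comp_def]

-- A's inner scan over seq2 is the filtered range, mapped to triples.
theorem pv_inner_eq (seq1 seq2 : String) (k i : Int) (hits : List (Int × Int × String)) :
    ((PySem.List.pyRange 0 (PySem.Str.len seq2 - k + 1) 1).foldl (fun hits j =>
      if PySem.Str.slice seq2 (some j) (some (j + k)) == PySem.Str.slice seq1 (some i) (some (i + k))
      then hits ++ [(i, j, PySem.Str.slice seq1 (some i) (some (i + k)))] else hits) hits)
    = hits ++ ((PySem.List.pyRange 0 (PySem.Str.len seq2 - k + 1) 1).filter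
        (fun j => PySem.Str.slice seq2 (some j) (some (j + k)) == PySem.Str.slice seq1 (some i) (some (i + k)))).map
        (fun j => (i, j, PySem.Str.slice seq1 (some i) (some (i + k)))) := by
  rw [PySem.List.foldl_append_if]

-- ===== VERDICT (by name: the statement is the Claim_ definition above) =====
theorem find_hits_spec : Claim_equal_find_hits := by
  intro seq1 seq2 k _
  unfold Spec_find_hits find_hits find_hits_alt
  simp only []
  have hstep : (fun (hits : List (Int × Int × String)) (i : Int) =>
      (PySem.List.pyRange 0 (PySem.Str.len seq2 - k + 1) 1).foldl (fun hits j =>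
        if PySem.Str.slice seq2 (some j) (some (j + k)) == PySem.Str.slice seq1 (some i) (some (i + k))
        then hits ++ [(i, j, PySem.Str.slice seq1 (some i) (some (i + k)))] else hits) hits)
      = (fun hits i => hits ++
          (((PySem.List.pyRange 0 (PySem.Str.len seq2 - k + 1) 1).foldl
              (fun d j => d.modify (PySem.Str.slice seq2 (some j) (some (j + k))) [] (· ++ [j]))
              (PySem.Dict.empty : PySem.Dict String (List Int))).getD
                (PySem.Str.slice seq1 (some i) (some (i + k))) []).map
            (fun j => (i, j, PySem.Str.slice seq1 (some i) (some (i + k))))) := by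
    funext hits i
    rw [pv_inner_eq, pv_index_getD]
  rw [hstep, PySem.List.foldl_append_eq_flatMap]
  simp
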